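-- pv_equiv track=rewrite | github.com/dsweet99/dryer | test/benchmark_data/module_004.py | compute_4_12
-- ===== SOURCE A (Python) =====
-- def compute_4_12(a, b, c):
--     x = a * 105 + b * 138
--     y = c * 107 - a * 164
--     for i in range(21):
--         x = x + i * 25
--         y = y - i * 29
--         if x > 5520:
--             x = x % 1260
--     return x + y + 49
-- ===== SOURCE B (Python) =====
-- def compute_4_12(a, b, c):
--     # Event-driven: jump between mod events using triangular-number prefix sums;
--     # y is closed-form (c*107 - a*164 - 29*210).
--     def t(i):
--         return i * (i + 1) // 2
--     x = a * 105 + b * 138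
--     base = -1
--     while True:
--         hit = next((i for i in range(base + 1, 21)
--                     if x + 25 * (t(i) - t(base)) > 5520), None)
--         if hit is None:
--             x += 25 * (t(20) - t(base))
--             break
--         x = (x + 25 * (t(hit) - t(base))) % 1260
--         base = hit
--     return x + c * 107 - a * 164 - 6090 + 49
-- ===== Notes on version B (the rewrite author's own statement) =====
-- stated objective: alternative
-- what changed: B replaces A's 21-step state simulation by an event-driven algorithm: it jumps between mod events using closed-form triangular-number prefix sums (t(i)=i*(i+1)//2), locating each next overflow index directly, and computes the independent y accumulator in closed form (c*107 - a*164 - 6090).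
import Mathlib
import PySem

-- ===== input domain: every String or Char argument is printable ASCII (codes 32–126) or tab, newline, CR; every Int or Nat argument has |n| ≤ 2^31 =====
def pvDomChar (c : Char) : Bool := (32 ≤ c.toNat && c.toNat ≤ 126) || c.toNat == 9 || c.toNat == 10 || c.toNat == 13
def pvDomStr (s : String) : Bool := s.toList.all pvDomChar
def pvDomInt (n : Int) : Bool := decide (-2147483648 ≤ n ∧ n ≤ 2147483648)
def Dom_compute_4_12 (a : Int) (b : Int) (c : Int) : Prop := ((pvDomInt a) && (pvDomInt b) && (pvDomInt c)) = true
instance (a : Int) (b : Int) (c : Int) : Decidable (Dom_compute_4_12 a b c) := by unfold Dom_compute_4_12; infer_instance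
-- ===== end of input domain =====

-- ===== PORT A =====
-- B replaces the per-step simulation by an event-driven jump between mod events
-- (triangular-number prefix sums) and a closed form for y; objective: alternative.
def compute_4_12 (a : Int) (b : Int) (c : Int) : Int :=
  let x := a * 105 + b * 138
  let y := c * 107 - a * 164
  let (x, y) := (PySem.List.pyRange 0 21 1).foldl
    (fun (s : Int × Int) (i : Int) =>
      let x := s.1 + i * 25
      let y := s.2 - i * 29
      let x := if x > 5520 then PySem.Int.mod x 1260 else x
      (x, y)) (x, y)
  x + y + 49

-- ===== PORT B =====
-- t(i) = i*(i+1)//2 from Source B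
def pvT (i : Int) : Int := PySem.Int.floordiv (i * (i + 1)) 2

-- the while-True loop of Source B: `base` = index of the last mod event (-1 initially),
-- `hit` = first index whose un-modded running value exceeds 5520 (next(...) → find?)
def pvGo (base : Int) (x : Int) : Int :=
  match h : (PySem.List.pyRange (base + 1) 21 1).find?
      (fun i => decide (x + 25 * (pvT i - pvT base) > 5520)) with
  | none => x + 25 * (pvT 20 - pvT base)
  | some hit => pvGo hit (PySem.Int.mod (x + 25 * (pvT hit - pvT base)) 1260)
termination_by (21 - base).toNat
decreasing_by
  have hm := List.mem_of_find?_eq_some h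
  rw [PySem.List.mem_pyRange_one] at hm
  omega

def compute_4_12_alt (a : Int) (b : Int) (c : Int) : Int :=
  pvGo (-1) (a * 105 + b * 138) + c * 107 - a * 164 - 6090 + 49

-- ===== PRECONDITION & SPEC =====
def Spec_compute_4_12 (a : Int) (b : Int) (c : Int) (out : Int) : Prop := out = compute_4_12_alt a b c
instance (a : Int) (b : Int) (c : Int) (out : Int) : Decidable (Spec_compute_4_12 a b c out) := by unfold Spec_compute_4_12; infer_instance

-- ===== CLAIM =====
def Claim_equal_compute_4_12 : Prop := ∀ (a : Int) (b : Int) (c : Int), Dom_compute_4_12 a b c → Spec_compute_4_12 a b c (compute_4_12 a b c)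

-- ===== LEMMAS AND PROOFS =====
def pvStepX (x i : Int) : Int :=
  let x := x + i * 25
  if x > 5520 then PySem.Int.mod x 1260 else x

theorem two_pvT (s : Int) : 2 * pvT s = s * (s + 1) := by
  obtain ⟨k, hk⟩ := Int.even_mul_succ_self s
  unfold pvT
  rw [PySem.Int.floordiv_eq_ediv_of_pos (by norm_num), hk]
  omega

theorem pvT_succ (s : Int) : pvT s = pvT (s - 1) + s := by
  have h1 := two_pvT s
  have h2 := two_pvT (s - 1)
  nlinarith

-- A's pair-state fold decouples: the y component is y0 - 29 * sum l.
theorem foldl_decouple (l : List Int) (x y : Int) :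
    l.foldl (fun (s : Int × Int) (i : Int) =>
      let x := s.1 + i * 25
      let y := s.2 - i * 29
      let x := if x > 5520 then PySem.Int.mod x 1260 else x
      (x, y)) (x, y)
    = (l.foldl pvStepX x, y - 29 * l.sum) := by
  induction l generalizing x y with
  | nil => simp
  | cons h t ih => simp only [List.foldl_cons, List.sum_cons, ih, pvStepX]; ring_nf

-- one unfolding of pvGo, as an equation
theorem pvGo_eq (base x : Int) :
    pvGo base x =
      match (PySem.List.pyRange (base + 1) 21 1).find?
          (fun i => decide (x + 25 * (pvT i - pvT base) > 5520)) with
      | none => x + 25 * (pvT 20 - pvT base)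
      | some hit => pvGo hit (PySem.Int.mod (x + 25 * (pvT hit - pvT base)) 1260) := by
  rw [pvGo]
  cases hf : (PySem.List.pyRange (base + 1) 21 1).find?
      (fun i => decide (x + 25 * (pvT i - pvT base) > 5520)) with
  | none => simp
  | some hit => simp

-- rebase: if the predicate fails at s = base+1, advancing the base one step (absorbing
-- the increment 25*s into x) does not change the result
theorem pvGo_rebase (s x : Int) (hs : s < 21)
    (hp : ¬ (x + 25 * s > 5520)) :
    pvGo (s - 1) x = pvGo s (x + 25 * s) := by
  have hT : pvT s = pvT (s - 1) + s := pvT_succ s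
  rw [pvGo_eq (s - 1) x, pvGo_eq s (x + 25 * s)]
  have hrange : PySem.List.pyRange (s - 1 + 1) 21 1 = s :: PySem.List.pyRange (s + 1) 21 1 := by
    have : s - 1 + 1 = s := by ring
    rw [this, PySem.List.pyRange_one_cons hs]
  rw [hrange, List.find?_cons]
  have hps : (decide (x + 25 * (pvT s - pvT (s - 1)) > 5520)) = false := by
    simp only [hT]; simp; omega
  rw [hps]
  have hfun : (fun i => decide (x + 25 * (pvT i - pvT (s - 1)) > 5520))
      = (fun i => decide (x + 25 * s + 25 * (pvT i - pvT s) > 5520)) := by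
    funext i
    have : x + 25 * (pvT i - pvT (s - 1)) = x + 25 * s + 25 * (pvT i - pvT s) := by
      rw [hT]; ring
    rw [this]
  rw [hfun]
  cases hf : (PySem.List.pyRange (s + 1) 21 1).find?
      (fun i => decide (x + 25 * s + 25 * (pvT i - pvT s) > 5520)) with
  | none => simp only []; rw [hT]; ring
  | some hit =>
      simp only []
      congr 1
      rw [hT]; ring

-- main invariant: pvGo from base = 20-n computes the fold of A's x-step over [21-n, 21)
theorem go_eq_fold (n : Nat) : ∀ (x : Int), (n : Int) ≤ 21 →
    pvGo (20 - (n : Int)) x = (PySem.List.pyRange (21 - (n : Int)) 21 1).foldl pvStepX x := by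
  induction n with
  | zero =>
      intro x _
      rw [pvGo_eq]
      have h1 : (20 : Int) - (0:Nat) + 1 = 21 := by norm_num
      rw [h1, PySem.List.pyRange_one_eq_nil (by norm_num)]
      simp [PySem.List.pyRange_one_eq_nil]
  | succ n ih =>
      intro x hn
      have hs : (21 : Int) - (n + 1 : Nat) < 21 := by push_cast; omega
      set s : Int := 21 - ((n : Int) + 1) with hsdef
      have hb : (20 : Int) - ((n : Nat) + 1 : Nat) = s - 1 := by push_cast; omega
      have hcons : PySem.List.pyRange s 21 1 = s :: PySem.List.pyRange (s + 1) 21 1 :=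
        PySem.List.pyRange_one_cons (by omega)
      have hfold : (PySem.List.pyRange (21 - ((n:Nat) + 1 : Nat)) 21 1).foldl pvStepX x
          = (PySem.List.pyRange (s + 1) 21 1).foldl pvStepX (pvStepX x s) := by
        have : (21 : Int) - ((n:Nat) + 1 : Nat) = s := by push_cast; omega
        rw [this, hcons, List.foldl_cons]
      rw [hb, hfold]
      have hs1 : s + 1 = 21 - (n : Int) := by omega
      by_cases hp : x + 25 * s > 5520
      · -- the predicate fires at s itself: one mod event, then recurse
        rw [pvGo_eq (s - 1) x]
        have hre : s - 1 + 1 = s := by ring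
        rw [hre, hcons, List.find?_cons]
        have hT : pvT s = pvT (s - 1) + s := pvT_succ s
        have hps : (decide (x + 25 * (pvT s - pvT (s - 1)) > 5520)) = true := by
          simp only [hT]; simp; omega
        rw [hps]
        simp only []
        have hv : PySem.Int.mod (x + 25 * (pvT s - pvT (s - 1))) 1260
            = PySem.Int.mod (x + s * 25) 1260 := by
          rw [hT]; ring_nf
        have hstep : pvStepX x s = PySem.Int.mod (x + s * 25) 1260 := by
          unfold pvStepX
          simp only []
          rw [if_pos (by omega)]
        rw [hv, hstep]
        have hsn : s = 20 - (n : Int) := by omega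
        have hrec := ih (PySem.Int.mod (x + s * 25) 1260) (by omega)
        rw [← hsn, ← hs1] at hrec
        exact hrec
      · -- no event at s: rebase and recurse
        rw [pvGo_rebase s x (by omega) hp]
        have hstep : pvStepX x s = x + s * 25 := by
          unfold pvStepX
          simp only []
          rw [if_neg (by omega)]
        have hsn : s = 20 - (n : Int) := by omega
        have h25 : x + s * 25 = x + 25 * s := by ring
        rw [hstep, h25]
        have hrec := ih (x + 25 * s) (by omega)
        rw [← hsn, ← hs1] at hrec
        exact hrec

-- ===== VERDICT =====
theorem compute_4_12_spec : Claim_equal_compute_4_12 := by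
  intro a b c _
  unfold Spec_compute_4_12 compute_4_12 compute_4_12_alt
  simp only [foldl_decouple]
  have hsum : (PySem.List.pyRange 0 21 1).sum = 210 := by decide
  have hgo := go_eq_fold 21 (a * 105 + b * 138) (by norm_num)
  have h1 : (20 : Int) - (21 : Nat) = -1 := by norm_num
  have h2 : (21 : Int) - (21 : Nat) = 0 := by norm_num
  rw [h1, h2] at hgo
  rw [hsum, hgo]
  ring
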